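-- pv_equiv track=rewrite | github.com/dfinson/coderecon | src/coderecon/index/_internal/indexing/resolver_cache.py | path_to_module
-- ===== SOURCE A (Python) =====
-- def path_to_module(path: str) -> str | None:
--     """Convert file path to module path.
--
--     Supports Python, JS/TS, and Rust files.
--     """
--     # Python: src/foo/bar.py -> src.foo.bar
--     if path.endswith(".py"):
--         module = path[:-3]
--         if module.endswith("/__init__"):
--             module = module[:-9]
--         module = module.replace("/", ".").replace("\\", ".")
--         module = module.lstrip(".")
--         return module
--     # JS/TS: src/foo/bar.ts -> src.foo.bar
--     js_exts = (".ts", ".tsx", ".js", ".jsx", ".mjs", ".cjs")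
--     for ext in js_exts:
--         if path.endswith(ext):
--             module = path[: -len(ext)]
--             if module.endswith("/index"):
--                 module = module[:-6]
--             module = module.replace("/", ".").replace("\\", ".")
--             module = module.lstrip(".")
--             return module
--     # Rust: src/foo/bar.rs -> src::foo::bar (uses :: separator)
--     if path.endswith(".rs"):
--         module = path[:-3]
--         if module.endswith("/mod") or module.endswith("/lib"):
--             module = module[:-4]
--         module = module.replace("/", "::").replace("\\", "::")
--         module = module.lstrip(":")
--         return module
--     return None
-- ===== SOURCE B (Python) =====
-- _TABLE = {
--     ".py": (("__init__",), "."),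
--     ".ts": (("index",), "."),
--     ".tsx": (("index",), "."),
--     ".js": (("index",), "."),
--     ".jsx": (("index",), "."),
--     ".mjs": (("index",), "."),
--     ".cjs": (("index",), "."),
--     ".rs": (("mod", "lib"), "::"),
-- }
--
--
-- def path_to_module(path: str) -> str | None:
--     """Convert file path to module path.
--
--     Looks the extension (text from the last dot) up in a table, splits the
--     stem into components, drops a special trailing component, and joins.
--     """
--     i = path.rfind(".")
--     if i < 0:
--         return None
--     cfg = _TABLE.get(path[i:])
--     if cfg is None:
--         return None
--     specials, sep = cfg
--     parts = path[:i].split("/")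
--     if len(parts) > 1 and parts[-1] in specials:
--         parts.pop()
--     pieces = [q for p in parts for q in p.split("\\")]
--     return sep.join(pieces).lstrip(sep[0])
-- ===== Notes on version B (the rewrite author's own statement) =====
-- stated objective: alternative
-- what changed: B computes the extension once (text from the last dot, via rfind) and looks it up in a dict instead of A's ordered endswith chain, and builds the module by splitting the stem into path components, popping a special trailing component and joining with the separator, instead of A's length-based suffix slicing plus replace/replace on the whole string.
import Mathlib
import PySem

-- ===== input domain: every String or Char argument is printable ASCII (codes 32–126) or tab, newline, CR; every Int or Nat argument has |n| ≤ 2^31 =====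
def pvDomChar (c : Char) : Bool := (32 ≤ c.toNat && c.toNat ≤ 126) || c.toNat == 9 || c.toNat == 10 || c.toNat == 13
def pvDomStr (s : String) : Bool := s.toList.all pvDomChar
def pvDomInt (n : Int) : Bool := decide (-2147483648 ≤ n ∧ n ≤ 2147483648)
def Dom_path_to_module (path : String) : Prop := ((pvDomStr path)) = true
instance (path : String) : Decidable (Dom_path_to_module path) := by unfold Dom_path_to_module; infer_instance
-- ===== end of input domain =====

-- B finds the extension once with rfind('.') + a dict lookup instead of A's ordered
-- endswith chain, and builds the module by splitting the stem into components,
-- popping a special last component and joining — instead of A's suffix slicing and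
-- replace/replace; objective: alternative (same cost, different algorithm).

-- exact port of str.replace(old, new) for a ONE-character old (all of A's calls)
def pyReplaceChar (c : Char) (rep : List Char) : List Char → List Char
  | [] => []
  | x :: xs => (if x = c then rep else [x]) ++ pyReplaceChar c rep xs

-- exact port of str.lstrip(chars) for a ONE-character class (all calls here)
def pyLstrip (c : Char) (l : List Char) : List Char := l.dropWhile (· == c)

-- ===== PORT A =====
-- A's 'for ext in js_exts' loop
def pvJsLoop (l : List Char) : List (List Char) → Option (List Char)
  | [] => none
  | ext :: rest =>
    if PySem.Chars.endswith l ext then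
      let m := PySem.List.slice l none (some (-(ext.length : Int)))
      let m := if PySem.Chars.endswith m "/index".toList then
          PySem.List.slice m none (some (-6)) else m
      some (pyLstrip '.' (pyReplaceChar '\\' ".".toList (pyReplaceChar '/' ".".toList m)))
    else pvJsLoop l rest

def path_to_module (path : String) : Option String :=
  let l := path.toList
  if PySem.Chars.endswith l ".py".toList then
    let m := PySem.List.slice l none (some (-3))
    let m := if PySem.Chars.endswith m "/__init__".toList then
        PySem.List.slice m none (some (-9)) else m
    some (String.ofList (pyLstrip '.' (pyReplaceChar '\\' ".".toList (pyReplaceChar '/' ".".toList m))))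
  else
    match pvJsLoop l [".ts".toList, ".tsx".toList, ".js".toList, ".jsx".toList, ".mjs".toList, ".cjs".toList] with
    | some m => some (String.ofList m)
    | none =>
      if PySem.Chars.endswith l ".rs".toList then
        let m := PySem.List.slice l none (some (-3))
        let m := if PySem.Chars.endswith m "/mod".toList || PySem.Chars.endswith m "/lib".toList then
            PySem.List.slice m none (some (-4)) else m
        some (String.ofList (pyLstrip ':' (pyReplaceChar '\\' "::".toList (pyReplaceChar '/' "::".toList m))))
      else none

-- ===== PORT B =====
-- path.rfind('.') as an Option: none ↔ rfind returned -1 (Source B's 'if i < 0' guard)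
def pvLastDot : List Char → Option Nat
  | [] => none
  | x :: xs =>
    match pvLastDot xs with
    | some i => some (i + 1)
    | none => if x = '.' then some 0 else none

-- exact port of str.split(sep) for a ONE-character sep (keeps empty pieces; [""] on "")
def pvSplitChar (c : Char) : List Char → List (List Char)
  | [] => [[]]
  | x :: xs =>
    match pvSplitChar c xs with
    | [] => [[]]
    | p :: ps => if x = c then [] :: p :: ps else (x :: p) :: ps

-- Source B's _TABLE: extension -> (special trailing components, separator)
def pvTable : PySem.Dict (List Char) (List (List Char) × List Char) :=
  PySem.Dict.mk
    [(".py".toList, (["__init__".toList], ".".toList)),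
     (".ts".toList, (["index".toList], ".".toList)),
     (".tsx".toList, (["index".toList], ".".toList)),
     (".js".toList, (["index".toList], ".".toList)),
     (".jsx".toList, (["index".toList], ".".toList)),
     (".mjs".toList, (["index".toList], ".".toList)),
     (".cjs".toList, (["index".toList], ".".toList)),
     (".rs".toList, (["mod".toList, "lib".toList], "::".toList))]

def path_to_module_alt (path : String) : Option String :=
  let l := path.toList
  match pvLastDot l with
  | none => none
  | some i =>
    match pvTable.get? (l.drop i) with
    | none => none
    | some (specials, sep) =>
      let parts := pvSplitChar '/' (l.take i)
      let parts := if 1 < parts.length ∧ parts.getLastD [] ∈ specials then parts.dropLast else parts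
      let pieces := parts.flatMap (pvSplitChar '\\')
      some (String.ofList (pyLstrip (sep.headD ' ') (List.intercalate sep pieces)))

-- ===== PRECONDITION & SPEC =====
def Spec_path_to_module (path : String) (out : Option String) : Prop := out = path_to_module_alt path
instance (path : String) (out : Option String) : Decidable (Spec_path_to_module path out) := by unfold Spec_path_to_module; infer_instance

-- ===== CLAIM =====
def Claim_equal_path_to_module : Prop := ∀ (path : String), Dom_path_to_module path → Spec_path_to_module path (path_to_module path)

-- ===== LEMMAS AND PROOFS =====

lemma split_ne_nil (c : Char) (l : List Char) : pvSplitChar c l ≠ [] := by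
  cases l with
  | nil => simp [pvSplitChar]
  | cons x xs =>
    simp only [pvSplitChar]
    rcases h : pvSplitChar c xs with _ | ⟨p, ps⟩ <;> simp <;> split <;> simp

lemma ic_cons_head (s q : List Char) (x : Char) (r : List (List Char)) :
    List.intercalate s ((x :: q) :: r) = x :: List.intercalate s (q :: r) := by
  cases r <;> simp [List.intercalate]

lemma ic_cons_nil_of_ne (s : List Char) (r : List (List Char)) (hr : r ≠ []) :
    List.intercalate s ([] :: r) = s ++ List.intercalate s r := by
  cases r with
  | nil => exact absurd rfl hr
  | cons a t => simp [List.intercalate]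

lemma flatMap_split_ne_nil (l : List (List Char)) (hl : l ≠ []) :
    l.flatMap (pvSplitChar '\\') ≠ [] := by
  cases l with
  | nil => exact absurd rfl hl
  | cons p ps =>
    simp only [List.flatMap_cons]
    intro h
    exact split_ne_nil '\\' p (List.append_eq_nil_iff.mp h).1

lemma pyReplaceChar_append (c : Char) (rep a b : List Char) :
    pyReplaceChar c rep (a ++ b) = pyReplaceChar c rep a ++ pyReplaceChar c rep b := by
  induction a with
  | nil => simp [pyReplaceChar]
  | cons x xs ih => simp [pyReplaceChar, ih]

-- L1: B's split/split/join pipeline equals A's replace('/',sep).replace('\',sep)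
lemma intercalate_split (sep : List Char) (hsep : pyReplaceChar '\\' sep sep = sep)
    (l : List Char) :
    List.intercalate sep ((pvSplitChar '/' l).flatMap (pvSplitChar '\\'))
      = pyReplaceChar '\\' sep (pyReplaceChar '/' sep l) := by
  induction l with
  | nil => simp [pvSplitChar, pyReplaceChar, List.intercalate]
  | cons x xs ih =>
    rcases h : pvSplitChar '/' xs with _ | ⟨p, ps⟩
    · exact absurd h (split_ne_nil '/' xs)
    · rw [h] at ih
      by_cases hx : x = '/'
      · subst hx
        simp only [pvSplitChar, h, reduceIte, List.flatMap_cons]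
        simp only [List.flatMap_cons] at ih
        rw [List.singleton_append,
            ic_cons_nil_of_ne _ _ (by
              have := flatMap_split_ne_nil (p :: ps) (by simp)
              simpa [List.flatMap_cons] using this), ih]
        simp [pyReplaceChar, pyReplaceChar_append, hsep]
      · by_cases hb : x = '\\'
        · subst hb
          simp only [pvSplitChar, h, if_neg hx]
          rcases hp : pvSplitChar '\\' p with _ | ⟨q, qs⟩
          · exact absurd hp (split_ne_nil '\\' p)
          · simp only [List.flatMap_cons, pvSplitChar, hp, reduceIte]
            rw [show (([] : List Char) :: q :: qs) ++ List.flatMap (pvSplitChar '\\') ps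
                  = [] :: ((q :: qs) ++ List.flatMap (pvSplitChar '\\') ps) from rfl,
                ic_cons_nil_of_ne _ _ (by simp)]
            rw [List.flatMap_cons, hp, List.cons_append] at ih
            rw [List.cons_append, ih]
            simp [pyReplaceChar, pyReplaceChar_append, hsep, hx]
        · simp only [pvSplitChar, h, if_neg hx]
          rcases hp : pvSplitChar '\\' p with _ | ⟨q, qs⟩
          · exact absurd hp (split_ne_nil '\\' p)
          · simp only [List.flatMap_cons, pvSplitChar, hp, if_neg hb]
            rw [show ((x :: q) :: qs) ++ List.flatMap (pvSplitChar '\\') ps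
                  = (x :: q) :: (qs ++ List.flatMap (pvSplitChar '\\') ps) from rfl,
                ic_cons_head]
            rw [List.flatMap_cons, hp, List.cons_append] at ih
            rw [ih]
            simp [pyReplaceChar, hx, hb]

-- split/join identity, for reconstructing the stem from its components
lemma join_split (c : Char) (l : List Char) :
    List.intercalate [c] (pvSplitChar c l) = l := by
  induction l with
  | nil => simp [pvSplitChar, List.intercalate]
  | cons x xs ih =>
    rcases h : pvSplitChar c xs with _ | ⟨p, ps⟩
    · exact absurd h (split_ne_nil c xs)
    · rw [h] at ih
      by_cases hx : x = c
      · subst hx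
        simp only [pvSplitChar, h, reduceIte]
        rw [ic_cons_nil_of_ne _ (p :: ps) (by simp), ih]
        rfl
      · simp only [pvSplitChar, h, if_neg hx]
        rw [ic_cons_head, ih]

lemma split_append (c : Char) (a b : List Char) :
    pvSplitChar c (a ++ c :: b) = pvSplitChar c a ++ pvSplitChar c b := by
  induction a with
  | nil =>
    rcases h : pvSplitChar c b with _ | ⟨p, ps⟩
    · exact absurd h (split_ne_nil c b)
    · simp [pvSplitChar, h]
  | cons x xs ih =>
    rcases h : pvSplitChar c (xs ++ c :: b) with _ | ⟨p, ps⟩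
    · exact absurd h (split_ne_nil c (xs ++ c :: b))
    · rcases h2 : pvSplitChar c xs with _ | ⟨q, qs⟩
      · exact absurd h2 (split_ne_nil c xs)
      · rw [h2] at ih
        simp only [List.cons_append, pvSplitChar, h, h2, ih]
        rcases ih' : (q :: qs ++ pvSplitChar c b) with _ | ⟨r, rs⟩
        · simp at ih'
        · rw [List.cons_append] at ih'
          injection ih' with hq hrs
          subst hq; subst hrs
          rw [ih] at h
          rw [List.cons_append] at h
          injection h with hp hps
          subst hp; subst hps
          by_cases hx : x = c <;> simp [hx]

lemma split_no_sep (c : Char) (l : List Char) (h : c ∉ l) : pvSplitChar c l = [l] := by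
  induction l with
  | nil => rfl
  | cons x xs ih =>
    rw [List.mem_cons, not_or] at h
    simp only [pvSplitChar, ih h.2, if_neg (Ne.symm h.1)]

-- pvLastDot: exact characterisation
lemma lastDot_eq_none (l : List Char) : pvLastDot l = none ↔ '.' ∉ l := by
  induction l with
  | nil => simp [pvLastDot]
  | cons x xs ih =>
    simp only [pvLastDot, List.mem_cons]
    rcases h : pvLastDot xs with _ | i
    · have ih' : '.' ∉ xs := ih.mp h
      by_cases hx : x = '.' <;> simp [h, hx, ih', eq_comm]
    · have hmem : '.' ∈ xs := by
        by_contra hc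
        rw [ih.mpr hc] at h
        cases h
      simp [h, hmem]

lemma lastDot_append (s t : List Char) (ht : '.' ∉ t) :
    pvLastDot (s ++ '.' :: t) = some s.length := by
  induction s with
  | nil => simp [pvLastDot, (lastDot_eq_none t).mpr ht]
  | cons x xs ih => simp [pvLastDot, ih]

lemma lastDot_spec (l : List Char) (i : Nat) (h : pvLastDot l = some i) :
    ∃ s t, l = s ++ '.' :: t ∧ '.' ∉ t ∧ s.length = i := by
  induction l generalizing i with
  | nil => simp [pvLastDot] at h
  | cons x xs ih =>
    simp only [pvLastDot] at h
    rcases h2 : pvLastDot xs with _ | j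
    · rw [h2] at h
      by_cases hx : x = '.'
      · subst hx
        simp at h
        exact ⟨[], xs, by simp, (lastDot_eq_none xs).mp h2, by simp [h]⟩
      · simp [hx] at h
    · rw [h2] at h
      simp at h
      obtain ⟨s, t, hl, hnt, hlen⟩ := ih j h2
      exact ⟨x :: s, t, by simp [hl], hnt, by simp [hlen, h]⟩

-- endswith ('.'::w) on a string whose LAST dot starts the suffix '.'::t  ⟺  t = w
lemma ew_ext_iff (s t w : List Char) (ht : '.' ∉ t) (hw : '.' ∉ w) :
    PySem.Chars.endswith (s ++ '.' :: t) ('.' :: w) = true ↔ t = w := by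
  rw [PySem.Chars.endswith_iff]
  constructor
  · rintro ⟨a, ha⟩
    have h1 : pvLastDot (s ++ '.' :: t) = some s.length := lastDot_append s t ht
    have h2 : pvLastDot (a ++ '.' :: w) = some a.length := lastDot_append a w hw
    rw [ha, h1] at h2
    have hlen : a.length = s.length := by simpa using h2.symm
    have := List.append_inj ha.symm (by omega)
    simpa using this.2
  · rintro rfl
    exact ⟨s, rfl⟩

lemma ew_false_of_no_dot (l p : List Char) (hl : '.' ∉ l) (hp : '.' ∈ p) :
    PySem.Chars.endswith l p = false := by
  rw [← Bool.not_eq_true, PySem.Chars.endswith_iff]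
  rintro ⟨a, rfl⟩
  exact hl (List.mem_append.mpr (Or.inr hp))

lemma ic_cons_cons (s a b : List Char) (t : List (List Char)) :
    List.intercalate s (a :: b :: t) = a ++ s ++ List.intercalate s (b :: t) := by
  simp [List.intercalate]

lemma ic_append_singleton (s y : List Char) (xs : List (List Char)) (h : xs ≠ []) :
    List.intercalate s (xs ++ [y]) = List.intercalate s xs ++ s ++ y := by
  induction xs with
  | nil => exact absurd rfl h
  | cons e es ih =>
    cases es with
    | nil => simp [List.intercalate]
    | cons f fs =>
      have h1 : (e :: f :: fs) ++ [y] = e :: f :: (fs ++ [y]) := by simp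
      rw [h1, ic_cons_cons, ← List.cons_append, ih (by simp), ic_cons_cons]
      simp [List.append_assoc]

-- the shared per-language tail: A's (maybe-strip + replace/replace + lstrip body)
-- equals B's (maybe-pop + split/split/join body)
lemma branch_eq (stem sep : List Char) (specials : List (List Char)) (L : Nat)
    (hlen : ∀ sp ∈ specials, sp.length + 1 = L)
    (hsl : ∀ sp ∈ specials, '/' ∉ sp)
    (hsep : pyReplaceChar '\\' sep sep = sep) :
    pyReplaceChar '\\' sep (pyReplaceChar '/' sep
        (if specials.any (fun sp => PySem.Chars.endswith stem ('/' :: sp)) then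
          stem.take (stem.length - L) else stem))
      = List.intercalate sep
          ((if 1 < (pvSplitChar '/' stem).length ∧ (pvSplitChar '/' stem).getLastD [] ∈ specials
            then (pvSplitChar '/' stem).dropLast else pvSplitChar '/' stem).flatMap
            (pvSplitChar '\\')) := by
  by_cases hA : specials.any (fun sp => PySem.Chars.endswith stem ('/' :: sp)) = true
  · obtain ⟨sp, hsp, hew⟩ := List.any_eq_true.mp hA
    obtain ⟨a, ha⟩ := (PySem.Chars.endswith_iff _ _).mp hew
    have hsplit : pvSplitChar '/' stem = pvSplitChar '/' a ++ [sp] := by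
      rw [← ha, split_append, split_no_sep '/' sp (hsl sp hsp)]
    have hB : 1 < (pvSplitChar '/' stem).length ∧ (pvSplitChar '/' stem).getLastD [] ∈ specials := by
      constructor
      · rw [hsplit, List.length_append]
        rcases h : pvSplitChar '/' a with _ | ⟨_, _⟩
        · exact absurd h (split_ne_nil '/' a)
        · simp
      · rw [hsplit, List.getLastD_concat]; exact hsp
    rw [if_pos hA, if_pos hB, hsplit, List.dropLast_concat]
    have htake : stem.take (stem.length - L) = a := by
      have hL : ('/' :: sp).length = L := by
        simp only [List.length_cons]
        exact hlen sp hsp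
      rw [← ha, List.length_append, hL, Nat.add_sub_cancel]
      exact List.take_left
    rw [htake, intercalate_split sep hsep a]
  · rw [if_neg hA]
    have hB : ¬ (1 < (pvSplitChar '/' stem).length ∧ (pvSplitChar '/' stem).getLastD [] ∈ specials) := by
      rintro ⟨hlen1, hmem⟩
      have hq : pvSplitChar '/' stem ≠ [] := split_ne_nil '/' stem
      have hdrop : (pvSplitChar '/' stem).dropLast ≠ [] := by
        intro h
        have := congrArg List.length h
        rw [List.length_dropLast] at this
        simp at this
        omega
      have hdecomp : (pvSplitChar '/' stem).dropLast ++ [(pvSplitChar '/' stem).getLastD []]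
          = pvSplitChar '/' stem := by
        rw [List.getLastD_eq_getLast?, List.getLast?_eq_some_getLast hq]
        exact List.dropLast_append_getLast hq
      have hstem : stem = List.intercalate ['/'] ((pvSplitChar '/' stem).dropLast)
          ++ '/' :: (pvSplitChar '/' stem).getLastD [] := by
        conv_lhs => rw [← join_split '/' stem, ← hdecomp]
        rw [ic_append_singleton _ _ _ hdrop]
        simp
      have hew : PySem.Chars.endswith stem ('/' :: (pvSplitChar '/' stem).getLastD []) = true := by
        rw [PySem.Chars.endswith_iff]
        exact ⟨_, hstem.symm⟩
      exact (Bool.eq_false_iff.mp (by simpa using hA))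
        (List.any_eq_true.mpr ⟨_, hmem, hew⟩)
    rw [if_neg hB, intercalate_split sep hsep stem]

lemma strip_ext (s ext : List Char) (h : 0 < ext.length) :
    PySem.List.slice (s ++ ext) none (some (-(ext.length : Int))) = s := by
  rw [PySem.List.slice_to_neg_natCast _ _ h, List.length_append, Nat.add_sub_cancel]
  exact List.take_left

lemma strip_ext3 (s ext : List Char) (h : ext.length = 3) :
    PySem.List.slice (s ++ ext) none (some (-3)) = s := by
  rw [PySem.List.slice_to_neg_ofNat _ 3 (by omega), List.length_append, h,
      Nat.add_sub_cancel]
  exact List.take_left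

-- the Python branch body for one language, A-shape = B-shape
lemma branch_py (m : List Char) :
    pyLstrip '.' (pyReplaceChar '\\' ".".toList (pyReplaceChar '/' ".".toList
      (if PySem.Chars.endswith m "/__init__".toList then PySem.List.slice m none (some (-9)) else m)))
    = pyLstrip (".".toList.headD ' ') (List.intercalate ".".toList
        ((if 1 < (pvSplitChar '/' m).length ∧ (pvSplitChar '/' m).getLastD [] ∈ ["__init__".toList]
          then (pvSplitChar '/' m).dropLast else pvSplitChar '/' m).flatMap (pvSplitChar '\\'))) := by
  rw [PySem.List.slice_to_neg_ofNat m 9 (by omega)]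
  have h := branch_eq m ".".toList ["__init__".toList] 9 (by decide) (by decide) (by decide)
  simp only [List.any_cons, List.any_nil, Bool.or_false] at h
  rw [show ("/__init__".toList) = '/' :: "__init__".toList from rfl, h]
  rfl

lemma branch_js (m : List Char) :
    pyLstrip '.' (pyReplaceChar '\\' ".".toList (pyReplaceChar '/' ".".toList
      (if PySem.Chars.endswith m "/index".toList then PySem.List.slice m none (some (-6)) else m)))
    = pyLstrip (".".toList.headD ' ') (List.intercalate ".".toList
        ((if 1 < (pvSplitChar '/' m).length ∧ (pvSplitChar '/' m).getLastD [] ∈ ["index".toList]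
          then (pvSplitChar '/' m).dropLast else pvSplitChar '/' m).flatMap (pvSplitChar '\\'))) := by
  rw [PySem.List.slice_to_neg_ofNat m 6 (by omega)]
  have h := branch_eq m ".".toList ["index".toList] 6 (by decide) (by decide) (by decide)
  simp only [List.any_cons, List.any_nil, Bool.or_false] at h
  rw [show ("/index".toList) = '/' :: "index".toList from rfl, h]
  rfl

lemma branch_rs (m : List Char) :
    pyLstrip ':' (pyReplaceChar '\\' "::".toList (pyReplaceChar '/' "::".toList
      (if PySem.Chars.endswith m "/mod".toList || PySem.Chars.endswith m "/lib".toList then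
        PySem.List.slice m none (some (-4)) else m)))
    = pyLstrip ("::".toList.headD ' ') (List.intercalate "::".toList
        ((if 1 < (pvSplitChar '/' m).length ∧ (pvSplitChar '/' m).getLastD [] ∈ ["mod".toList, "lib".toList]
          then (pvSplitChar '/' m).dropLast else pvSplitChar '/' m).flatMap (pvSplitChar '\\'))) := by
  rw [PySem.List.slice_to_neg_ofNat m 4 (by omega)]
  have h := branch_eq m "::".toList ["mod".toList, "lib".toList] 4 (by decide) (by decide) (by decide)
  simp only [List.any_cons, List.any_nil, Bool.or_false] at h
  rw [show ("/mod".toList) = '/' :: "mod".toList from rfl,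
      show ("/lib".toList) = '/' :: "lib".toList from rfl, h]
  rfl

-- ===== VERDICT =====
theorem path_to_module_spec : Claim_equal_path_to_module := by
  intro path _
  unfold Spec_path_to_module path_to_module path_to_module_alt
  cases hld : pvLastDot path.toList with
  | none =>
    have hnd : '.' ∉ path.toList := (lastDot_eq_none _).mp hld
    have e1 : PySem.Chars.endswith path.toList ['.','p','y'] = false :=
      ew_false_of_no_dot _ _ hnd (by decide)
    have e2 : PySem.Chars.endswith path.toList ['.','t','s'] = false :=
      ew_false_of_no_dot _ _ hnd (by decide)
    have e3 : PySem.Chars.endswith path.toList ['.','t','s','x'] = false :=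
      ew_false_of_no_dot _ _ hnd (by decide)
    have e4 : PySem.Chars.endswith path.toList ['.','j','s'] = false :=
      ew_false_of_no_dot _ _ hnd (by decide)
    have e5 : PySem.Chars.endswith path.toList ['.','j','s','x'] = false :=
      ew_false_of_no_dot _ _ hnd (by decide)
    have e6 : PySem.Chars.endswith path.toList ['.','m','j','s'] = false :=
      ew_false_of_no_dot _ _ hnd (by decide)
    have e7 : PySem.Chars.endswith path.toList ['.','c','j','s'] = false :=
      ew_false_of_no_dot _ _ hnd (by decide)
    have e8 : PySem.Chars.endswith path.toList ['.','r','s'] = false :=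
      ew_false_of_no_dot _ _ hnd (by decide)
    simp [pvJsLoop, hld, e1, e2, e3, e4, e5, e6, e7, e8]
  | some i =>
    obtain ⟨s, t, hlst, hnt, hslen⟩ := lastDot_spec _ i hld
    have htake : (path.toList).take i = s := by
      rw [hlst, ← hslen]; exact List.take_left
    have hdrop : (path.toList).drop i = '.' :: t := by
      rw [hlst, ← hslen]; exact List.drop_left
    have hewiff : ∀ w : List Char, '.' ∉ w →
        (PySem.Chars.endswith path.toList ('.' :: w) = true ↔ t = w) := by
      intro w hw; rw [hlst]; exact ew_ext_iff s t w hnt hw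
    have ewt : ∀ w : List Char, '.' ∉ w → t = w →
        PySem.Chars.endswith path.toList ('.' :: w) = true :=
      fun w hw h => (hewiff w hw).mpr h
    have ewf : ∀ w : List Char, '.' ∉ w → t ≠ w →
        PySem.Chars.endswith path.toList ('.' :: w) = false :=
      fun w hw hne => Bool.eq_false_iff.mpr (fun hc => hne ((hewiff w hw).mp hc))
    by_cases k1 : t = ['p','y']
    · have hA : PySem.Chars.endswith path.toList ".py".toList = true := ewt ['p','y'] (by decide) k1
      have hget : pvTable.get? (path.toList.drop i) = some (["__init__".toList], ".".toList) := by
        rw [hdrop, k1]; rfl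
      have hstem3 : PySem.List.slice path.toList none (some (-3)) = s := by
        rw [hlst, k1]; exact strip_ext3 s _ (by decide)
      simp only [pvJsLoop, hld, hA, hget, hstem3, htake, eq_self_iff_true, if_true, Bool.false_eq_true, if_false]
      exact congrArg (fun x => some (String.ofList x)) (branch_py s)
    · by_cases k2 : t = ['t','s']
      · have f1 : PySem.Chars.endswith path.toList ".py".toList = false := ewf ['p','y'] (by decide) (by simp [k2])
        have hA : PySem.Chars.endswith path.toList ".ts".toList = true := ewt ['t','s'] (by decide) k2
        have hget : pvTable.get? (path.toList.drop i) = some (["index".toList], ".".toList) := by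
          rw [hdrop, k2]; rfl
        have hstem : PySem.List.slice path.toList none (some (-(".ts".toList.length : Int))) = s := by
          rw [hlst, k2]; exact strip_ext s ".ts".toList (by decide)
        simp only [pvJsLoop, hld, f1, hA, hget, hstem, htake, eq_self_iff_true, if_true, Bool.false_eq_true, if_false]
        exact congrArg (fun x => some (String.ofList x)) (branch_js s)
      · by_cases k3 : t = ['t','s','x']
        · have f1 : PySem.Chars.endswith path.toList ".py".toList = false := ewf ['p','y'] (by decide) (by simp [k3])
          have f2 : PySem.Chars.endswith path.toList ".ts".toList = false := ewf ['t','s'] (by decide) (by simp [k3])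
          have hA : PySem.Chars.endswith path.toList ".tsx".toList = true := ewt ['t','s','x'] (by decide) k3
          have hget : pvTable.get? (path.toList.drop i) = some (["index".toList], ".".toList) := by
            rw [hdrop, k3]; rfl
          have hstem : PySem.List.slice path.toList none (some (-(".tsx".toList.length : Int))) = s := by
            rw [hlst, k3]; exact strip_ext s ".tsx".toList (by decide)
          simp only [pvJsLoop, hld, f1, f2, hA, hget, hstem, htake, eq_self_iff_true, if_true, Bool.false_eq_true, if_false]
          exact congrArg (fun x => some (String.ofList x)) (branch_js s)
        · by_cases k4 : t = ['j','s']
          · have f1 : PySem.Chars.endswith path.toList ".py".toList = false := ewf ['p','y'] (by decide) (by simp [k4])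
            have f2 : PySem.Chars.endswith path.toList ".ts".toList = false := ewf ['t','s'] (by decide) (by simp [k4])
            have f3 : PySem.Chars.endswith path.toList ".tsx".toList = false := ewf ['t','s','x'] (by decide) (by simp [k4])
            have hA : PySem.Chars.endswith path.toList ".js".toList = true := ewt ['j','s'] (by decide) k4
            have hget : pvTable.get? (path.toList.drop i) = some (["index".toList], ".".toList) := by
              rw [hdrop, k4]; rfl
            have hstem : PySem.List.slice path.toList none (some (-(".js".toList.length : Int))) = s := by
              rw [hlst, k4]; exact strip_ext s ".js".toList (by decide)
            simp only [pvJsLoop, hld, f1, f2, f3, hA, hget, hstem, htake, eq_self_iff_true, if_true, Bool.false_eq_true, if_false]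
            exact congrArg (fun x => some (String.ofList x)) (branch_js s)
          · by_cases k5 : t = ['j','s','x']
            · have f1 : PySem.Chars.endswith path.toList ".py".toList = false := ewf ['p','y'] (by decide) (by simp [k5])
              have f2 : PySem.Chars.endswith path.toList ".ts".toList = false := ewf ['t','s'] (by decide) (by simp [k5])
              have f3 : PySem.Chars.endswith path.toList ".tsx".toList = false := ewf ['t','s','x'] (by decide) (by simp [k5])
              have f4 : PySem.Chars.endswith path.toList ".js".toList = false := ewf ['j','s'] (by decide) (by simp [k5])
              have hA : PySem.Chars.endswith path.toList ".jsx".toList = true := ewt ['j','s','x'] (by decide) k5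
              have hget : pvTable.get? (path.toList.drop i) = some (["index".toList], ".".toList) := by
                rw [hdrop, k5]; rfl
              have hstem : PySem.List.slice path.toList none (some (-(".jsx".toList.length : Int))) = s := by
                rw [hlst, k5]; exact strip_ext s ".jsx".toList (by decide)
              simp only [pvJsLoop, hld, f1, f2, f3, f4, hA, hget, hstem, htake, eq_self_iff_true, if_true, Bool.false_eq_true, if_false]
              exact congrArg (fun x => some (String.ofList x)) (branch_js s)
            · by_cases k6 : t = ['m','j','s']
              · have f1 : PySem.Chars.endswith path.toList ".py".toList = false := ewf ['p','y'] (by decide) (by simp [k6])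
                have f2 : PySem.Chars.endswith path.toList ".ts".toList = false := ewf ['t','s'] (by decide) (by simp [k6])
                have f3 : PySem.Chars.endswith path.toList ".tsx".toList = false := ewf ['t','s','x'] (by decide) (by simp [k6])
                have f4 : PySem.Chars.endswith path.toList ".js".toList = false := ewf ['j','s'] (by decide) (by simp [k6])
                have f5 : PySem.Chars.endswith path.toList ".jsx".toList = false := ewf ['j','s','x'] (by decide) (by simp [k6])
                have hA : PySem.Chars.endswith path.toList ".mjs".toList = true := ewt ['m','j','s'] (by decide) k6
                have hget : pvTable.get? (path.toList.drop i) = some (["index".toList], ".".toList) := by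
                  rw [hdrop, k6]; rfl
                have hstem : PySem.List.slice path.toList none (some (-(".mjs".toList.length : Int))) = s := by
                  rw [hlst, k6]; exact strip_ext s ".mjs".toList (by decide)
                simp only [pvJsLoop, hld, f1, f2, f3, f4, f5, hA, hget, hstem, htake, eq_self_iff_true, if_true, Bool.false_eq_true, if_false]
                exact congrArg (fun x => some (String.ofList x)) (branch_js s)
              · by_cases k7 : t = ['c','j','s']
                · have f1 : PySem.Chars.endswith path.toList ".py".toList = false := ewf ['p','y'] (by decide) (by simp [k7])
                  have f2 : PySem.Chars.endswith path.toList ".ts".toList = false := ewf ['t','s'] (by decide) (by simp [k7])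
                  have f3 : PySem.Chars.endswith path.toList ".tsx".toList = false := ewf ['t','s','x'] (by decide) (by simp [k7])
                  have f4 : PySem.Chars.endswith path.toList ".js".toList = false := ewf ['j','s'] (by decide) (by simp [k7])
                  have f5 : PySem.Chars.endswith path.toList ".jsx".toList = false := ewf ['j','s','x'] (by decide) (by simp [k7])
                  have f6 : PySem.Chars.endswith path.toList ".mjs".toList = false := ewf ['m','j','s'] (by decide) (by simp [k7])
                  have hA : PySem.Chars.endswith path.toList ".cjs".toList = true := ewt ['c','j','s'] (by decide) k7
                  have hget : pvTable.get? (path.toList.drop i) = some (["index".toList], ".".toList) := by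
                    rw [hdrop, k7]; rfl
                  have hstem : PySem.List.slice path.toList none (some (-(".cjs".toList.length : Int))) = s := by
                    rw [hlst, k7]; exact strip_ext s ".cjs".toList (by decide)
                  simp only [pvJsLoop, hld, f1, f2, f3, f4, f5, f6, hA, hget, hstem, htake, eq_self_iff_true, if_true, Bool.false_eq_true, if_false]
                  exact congrArg (fun x => some (String.ofList x)) (branch_js s)
                · by_cases k8 : t = ['r','s']
                  · have f1 : PySem.Chars.endswith path.toList ".py".toList = false := ewf ['p','y'] (by decide) (by simp [k8])
                    have f2 : PySem.Chars.endswith path.toList ".ts".toList = false := ewf ['t','s'] (by decide) (by simp [k8])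
                    have f3 : PySem.Chars.endswith path.toList ".tsx".toList = false := ewf ['t','s','x'] (by decide) (by simp [k8])
                    have f4 : PySem.Chars.endswith path.toList ".js".toList = false := ewf ['j','s'] (by decide) (by simp [k8])
                    have f5 : PySem.Chars.endswith path.toList ".jsx".toList = false := ewf ['j','s','x'] (by decide) (by simp [k8])
                    have f6 : PySem.Chars.endswith path.toList ".mjs".toList = false := ewf ['m','j','s'] (by decide) (by simp [k8])
                    have f7 : PySem.Chars.endswith path.toList ".cjs".toList = false := ewf ['c','j','s'] (by decide) (by simp [k8])
                    have hA : PySem.Chars.endswith path.toList ".rs".toList = true := ewt ['r','s'] (by decide) k8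
                    have hget : pvTable.get? (path.toList.drop i) = some (["mod".toList, "lib".toList], "::".toList) := by
                      rw [hdrop, k8]; rfl
                    have hstem3 : PySem.List.slice path.toList none (some (-3)) = s := by
                      rw [hlst, k8]; exact strip_ext3 s _ (by decide)
                    simp only [pvJsLoop, hld, f1, f2, f3, f4, f5, f6, f7, hA, hget, hstem3, htake, eq_self_iff_true, if_true, Bool.false_eq_true, if_false]
                    exact congrArg (fun x => some (String.ofList x)) (branch_rs s)
                  · have f1 : PySem.Chars.endswith path.toList ['.','p','y'] = false := ewf ['p','y'] (by decide) k1
                    have f2 : PySem.Chars.endswith path.toList ['.','t','s'] = false := ewf ['t','s'] (by decide) k2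
                    have f3 : PySem.Chars.endswith path.toList ['.','t','s','x'] = false := ewf ['t','s','x'] (by decide) k3
                    have f4 : PySem.Chars.endswith path.toList ['.','j','s'] = false := ewf ['j','s'] (by decide) k4
                    have f5 : PySem.Chars.endswith path.toList ['.','j','s','x'] = false := ewf ['j','s','x'] (by decide) k5
                    have f6 : PySem.Chars.endswith path.toList ['.','m','j','s'] = false := ewf ['m','j','s'] (by decide) k6
                    have f7 : PySem.Chars.endswith path.toList ['.','c','j','s'] = false := ewf ['c','j','s'] (by decide) k7
                    have f8 : PySem.Chars.endswith path.toList ['.','r','s'] = false := ewf ['r','s'] (by decide) k8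
                    have g1 : (('.' :: t) == ".py".toList) = false := beq_eq_false_iff_ne.mpr (by simp [k1])
                    have g2 : (('.' :: t) == ".ts".toList) = false := beq_eq_false_iff_ne.mpr (by simp [k2])
                    have g3 : (('.' :: t) == ".tsx".toList) = false := beq_eq_false_iff_ne.mpr (by simp [k3])
                    have g4 : (('.' :: t) == ".js".toList) = false := beq_eq_false_iff_ne.mpr (by simp [k4])
                    have g5 : (('.' :: t) == ".jsx".toList) = false := beq_eq_false_iff_ne.mpr (by simp [k5])
                    have g6 : (('.' :: t) == ".mjs".toList) = false := beq_eq_false_iff_ne.mpr (by simp [k6])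
                    have g7 : (('.' :: t) == ".cjs".toList) = false := beq_eq_false_iff_ne.mpr (by simp [k7])
                    have g8 : (('.' :: t) == ".rs".toList) = false := beq_eq_false_iff_ne.mpr (by simp [k8])
                    have hget : pvTable.get? (path.toList.drop i) = none := by
                      rw [hdrop]
                      simp [pvTable, PySem.Dict.get?, g1, g2, g3, g4, g5, g6, g7, g8]
                      exact ⟨fun h => k1 h.symm, fun h => k2 h.symm, fun h => k3 h.symm,
                        fun h => k4 h.symm, fun h => k5 h.symm, fun h => k6 h.symm,
                        fun h => k7 h.symm, fun h => k8 h.symm⟩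
                    simp [pvJsLoop, hld, f1, f2, f3, f4, f5, f6, f7, f8, hget]
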